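-- pv_equiv track=rewrite | github.com/dalbozlantern/metal-cnn | utils/image_splitting.py | downshift_array
-- ===== SOURCE A (Python) =====
-- def downshift_array(sequence_lengths, scaled_values):
--     cum_sums = [sequence_lengths[0]]
--     for i in range(1, len(scaled_values)):
--         if scaled_values[i] == scaled_values[i-1]:
--             cum_sums += [sequence_lengths[i] + cum_sums[i-1]]
--         else:
--             cum_sums += [sequence_lengths[i]]
--     right_to_left_unique = [scaled_values[i] != scaled_values[i+1] for i in range(len(scaled_values) - 1)] + [True]
--     sequence_lengths = [cum_sums[i] for i in range(len(right_to_left_unique)) if right_to_left_unique[i]]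
--     scaled_values = [scaled_values[i] for i in range(len(right_to_left_unique)) if right_to_left_unique[i]]
--     return sequence_lengths, scaled_values
-- ===== SOURCE B (Python) =====
-- def downshift_array(sequence_lengths, scaled_values):
--     out_lengths = []
--     out_values = []
--     current_sum = sequence_lengths[0]
--     for i in range(1, len(scaled_values)):
--         if scaled_values[i] == scaled_values[i - 1]:
--             current_sum += sequence_lengths[i]
--         else:
--             out_lengths.append(current_sum)
--             out_values.append(scaled_values[i - 1])
--             current_sum = sequence_lengths[i]
--     out_lengths.append(current_sum)
--     out_values.append(scaled_values[-1])
--     return out_lengths, out_values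
-- ===== Notes on version B (the rewrite author's own statement) =====
-- stated objective: simpler
-- what changed: Replaces A's three passes (build cum_sums array, build a run-end boolean mask, two filtered comprehensions indexing into them) with one fused forward loop keeping a single scalar run accumulator and emitting each run directly.
import Mathlib
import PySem

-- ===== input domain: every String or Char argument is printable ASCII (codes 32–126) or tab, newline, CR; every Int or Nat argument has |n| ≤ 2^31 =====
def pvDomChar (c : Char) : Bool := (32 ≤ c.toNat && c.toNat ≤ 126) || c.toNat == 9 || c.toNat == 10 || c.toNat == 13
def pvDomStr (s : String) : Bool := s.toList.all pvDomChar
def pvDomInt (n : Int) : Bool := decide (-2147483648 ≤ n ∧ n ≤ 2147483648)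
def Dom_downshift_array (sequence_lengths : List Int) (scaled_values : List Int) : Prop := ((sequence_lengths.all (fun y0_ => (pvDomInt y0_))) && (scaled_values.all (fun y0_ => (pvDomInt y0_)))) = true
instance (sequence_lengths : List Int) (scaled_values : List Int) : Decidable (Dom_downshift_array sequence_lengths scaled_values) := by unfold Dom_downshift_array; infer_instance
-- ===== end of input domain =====

-- B replaces A's cum_sums array + run-end mask + two filtered comprehensions by one
-- fused forward loop with a scalar run accumulator (objective: simpler; equal output).

-- ===== PORT A =====
-- the body of A's first loop ('if scaled_values[i] == …: cum_sums += [...] else: …')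
def dsA_step (sequence_lengths scaled_values : List Int) (cs : List Int) (i : Int) : List Int :=
  if PySem.List.pyGetD scaled_values i 0 == PySem.List.pyGetD scaled_values (i-1) 0 then
    cs ++ [PySem.List.pyGetD sequence_lengths i 0 + PySem.List.pyGetD cs (i-1) 0]
  else
    cs ++ [PySem.List.pyGetD sequence_lengths i 0]

def downshift_array (sequence_lengths : List Int) (scaled_values : List Int) : List Int × List Int :=
  let cum_sums := (PySem.List.pyRange 1 (scaled_values.length : Int) 1).foldl
      (dsA_step sequence_lengths scaled_values) [PySem.List.pyGetD sequence_lengths 0 0]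
  let rtlu : List Bool :=
    (PySem.List.pyRange 0 ((scaled_values.length : Int) - 1) 1).map
      (fun i => PySem.List.pyGetD scaled_values i 0 != PySem.List.pyGetD scaled_values (i+1) 0) ++ [true]
  let seq' := (PySem.List.pyRange 0 (rtlu.length : Int) 1).foldl
      (fun acc i => if PySem.List.pyGetD rtlu i false then acc ++ [PySem.List.pyGetD cum_sums i 0] else acc) []
  let vals := (PySem.List.pyRange 0 (rtlu.length : Int) 1).foldl
      (fun acc i => if PySem.List.pyGetD rtlu i false then acc ++ [PySem.List.pyGetD scaled_values i 0] else acc) []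
  (seq', vals)

-- ===== PORT B =====
-- the body of B's single loop; state = (out_lengths, out_values, current_sum)
def dsB_step (sequence_lengths scaled_values : List Int)
    (st : List Int × List Int × Int) (i : Int) : List Int × List Int × Int :=
  if PySem.List.pyGetD scaled_values i 0 == PySem.List.pyGetD scaled_values (i-1) 0 then
    (st.1, st.2.1, st.2.2 + PySem.List.pyGetD sequence_lengths i 0)
  else
    (st.1 ++ [st.2.2], st.2.1 ++ [PySem.List.pyGetD scaled_values (i-1) 0],
     PySem.List.pyGetD sequence_lengths i 0)

def downshift_array_alt (sequence_lengths : List Int) (scaled_values : List Int) : List Int × List Int :=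
  let st := (PySem.List.pyRange 1 (scaled_values.length : Int) 1).foldl
      (dsB_step sequence_lengths scaled_values)
      ([], [], PySem.List.pyGetD sequence_lengths 0 0)
  (st.1 ++ [st.2.2], st.2.1 ++ [PySem.List.pyGetD scaled_values (-1) 0])

-- ===== PRECONDITION & SPEC =====
-- Pre_: exactly where A returns — A raises IndexError when scaled_values is empty
-- (it reads scaled_values[0]/sequence_lengths[0]) or when scaled_values is longer than
-- sequence_lengths (it reads sequence_lengths[i] for every i < len(scaled_values)).
def Pre_downshift_array (sequence_lengths : List Int) (scaled_values : List Int) : Prop :=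
  scaled_values ≠ [] ∧ scaled_values.length ≤ sequence_lengths.length
instance (sequence_lengths : List Int) (scaled_values : List Int) : Decidable (Pre_downshift_array sequence_lengths scaled_values) := by unfold Pre_downshift_array; infer_instance

def pvWitness_downshift_array : List Int × List Int := ([2, 3, 4], [5, 5, 7])

def Spec_downshift_array (sequence_lengths : List Int) (scaled_values : List Int) (out : List Int × List Int) : Prop := out = downshift_array_alt sequence_lengths scaled_values
instance (sequence_lengths : List Int) (scaled_values : List Int) (out : List Int × List Int) : Decidable (Spec_downshift_array sequence_lengths scaled_values out) := by unfold Spec_downshift_array; infer_instance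

-- ===== CLAIM (what is proved, stated in full; the proofs are below) =====
def Claim_equal_downshift_array : Prop := ∀ (sequence_lengths : List Int) (scaled_values : List Int), Dom_downshift_array sequence_lengths scaled_values → Pre_downshift_array sequence_lengths scaled_values → Spec_downshift_array sequence_lengths scaled_values (downshift_array sequence_lengths scaled_values)

-- ===== LEMMAS AND PROOFS =====

theorem getD_concat_len {α : Type} (l : List α) (x d : α) : (l ++ [x]).getD l.length d = x := by
  simp only [List.getD, List.getElem?_concat_length, Option.getD_some]

theorem getD_append_lt {α : Type} (l : List α) (x d : α) (j : Nat) (h : j < l.length) :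
    (l ++ [x]).getD j d = l.getD j d := by
  simp [List.getD, List.getElem?_append_left h]

-- run-end test at position j (Bool, as A's mask computes it)
def dsEnd (scaled_values : List Int) (j : Nat) : Bool :=
  scaled_values.getD j 0 != scaled_values.getD (j+1) 0

-- joint loop invariant: after processing indices 1..m-1, A's cum_sums has length m,
-- B's current_sum is cum_sums[m-1], and B's two output lists are A's filtered maps over range (m-1)
theorem ds_inv (sl sv : List Int) (m : Nat) (hm : 1 ≤ m) :
    ((PySem.List.pyRange 1 (m : Int) 1).foldl (dsA_step sl sv) [PySem.List.pyGetD sl 0 0]).length = m ∧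
    (PySem.List.pyRange 1 (m : Int) 1).foldl (dsB_step sl sv) ([], [], PySem.List.pyGetD sl 0 0) =
      (((List.range (m-1)).filter (dsEnd sv)).map
          (fun j => ((PySem.List.pyRange 1 (m : Int) 1).foldl (dsA_step sl sv) [PySem.List.pyGetD sl 0 0]).getD j 0),
       ((List.range (m-1)).filter (dsEnd sv)).map (fun j => sv.getD j 0),
       ((PySem.List.pyRange 1 (m : Int) 1).foldl (dsA_step sl sv) [PySem.List.pyGetD sl 0 0]).getD (m-1) 0) := by
  induction m with
  | zero => omega
  | succ m ih =>
    by_cases hm1 : m = 0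
    · subst hm1
      simp [PySem.List.pyRange_one_eq_nil]
    · have hm' : 1 ≤ m := by omega
      obtain ⟨hlen, hst⟩ := ih hm'
      have hcast : ((m : Int) + 1) = ((m+1 : Nat) : Int) := by push_cast; ring
      have hsplit : PySem.List.pyRange 1 ((m+1 : Nat) : Int) 1
          = PySem.List.pyRange 1 (m : Int) 1 ++ [(m : Int)] := by
        rw [← hcast, PySem.List.pyRange_one_succ_right (by exact_mod_cast hm')]
      set cs := (PySem.List.pyRange 1 (m : Int) 1).foldl (dsA_step sl sv) [PySem.List.pyGetD sl 0 0] with hcs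
      rw [hsplit, List.foldl_append, List.foldl_append, ← hcs, hst]
      have hidx : ((m : Int) - 1) = ((m - 1 : Nat) : Int) := by push_cast [hm']; ring
      have hmask : ∀ j ∈ (List.range (m-1)).filter (dsEnd sv), j < cs.length := by
        intro j hj
        have := List.mem_range.mp (List.mem_filter.mp hj).1
        omega
      by_cases heq : sv.getD m 0 = sv.getD (m-1) 0
      · -- equal to previous: A extends the running sum, B accumulates
        have hstepA : dsA_step sl sv cs (m : Int)
            = cs ++ [PySem.List.pyGetD sl (m : Int) 0 + cs.getD (m-1) 0] := by
          simp only [dsA_step, hidx, PySem.List.pyGetD_natCast]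
          rw [if_pos (beq_iff_eq.mpr heq)]
        have hstepB : dsB_step sl sv
              (((List.range (m-1)).filter (dsEnd sv)).map (fun j => cs.getD j 0),
               ((List.range (m-1)).filter (dsEnd sv)).map (fun j => sv.getD j 0),
               cs.getD (m-1) 0) (m : Int)
            = (((List.range (m-1)).filter (dsEnd sv)).map (fun j => cs.getD j 0),
               ((List.range (m-1)).filter (dsEnd sv)).map (fun j => sv.getD j 0),
               cs.getD (m-1) 0 + PySem.List.pyGetD sl (m : Int) 0) := by
          simp only [dsB_step, hidx, PySem.List.pyGetD_natCast]
          rw [if_pos (beq_iff_eq.mpr heq)]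
        have hfilter : (List.range (m+1-1)).filter (dsEnd sv) = (List.range (m-1)).filter (dsEnd sv) := by
          have : m + 1 - 1 = (m - 1) + 1 := by omega
          rw [this, List.range_succ, List.filter_append]
          have hde : dsEnd sv (m-1) = false := by
            simp only [dsEnd, show m - 1 + 1 = m by omega, bne_eq_false_iff_eq]
            exact heq.symm
          simp [hde]
        simp only [List.foldl_cons, List.foldl_nil]
        rw [hstepA, hstepB]
        refine ⟨by simp [hlen], ?_⟩
        rw [hfilter]
        have hmap : ∀ j ∈ (List.range (m-1)).filter (dsEnd sv),
            (cs ++ [PySem.List.pyGetD sl (m : Int) 0 + cs.getD (m-1) 0]).getD j 0 = cs.getD j 0 := by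
          intro j hj; exact getD_append_lt _ _ _ _ (hmask j hj)
        rw [List.map_congr_left hmap]
        have hlast : (cs ++ [PySem.List.pyGetD sl (m : Int) 0 + cs.getD (m-1) 0]).getD (m+1-1) 0
            = PySem.List.pyGetD sl (m : Int) 0 + cs.getD (m-1) 0 := by
          have : m + 1 - 1 = cs.length := by omega
          rw [this, getD_concat_len]
        rw [hlast]
        simp only [Prod.mk.injEq]
        exact ⟨trivial, trivial, by ring⟩
      · -- new run: A starts a fresh sum, B emits the finished run
        have hstepA : dsA_step sl sv cs (m : Int) = cs ++ [PySem.List.pyGetD sl (m : Int) 0] := by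
          simp only [dsA_step, hidx, PySem.List.pyGetD_natCast]
          rw [if_neg (by simp only [beq_iff_eq]; exact heq)]
        have hstepB : dsB_step sl sv
              (((List.range (m-1)).filter (dsEnd sv)).map (fun j => cs.getD j 0),
               ((List.range (m-1)).filter (dsEnd sv)).map (fun j => sv.getD j 0),
               cs.getD (m-1) 0) (m : Int)
            = (((List.range (m-1)).filter (dsEnd sv)).map (fun j => cs.getD j 0) ++ [cs.getD (m-1) 0],
               ((List.range (m-1)).filter (dsEnd sv)).map (fun j => sv.getD j 0) ++ [sv.getD (m-1) 0],
               PySem.List.pyGetD sl (m : Int) 0) := by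
          simp only [dsB_step, hidx, PySem.List.pyGetD_natCast]
          rw [if_neg (by simp only [beq_iff_eq]; exact heq)]
        have hfilter : (List.range (m+1-1)).filter (dsEnd sv)
            = (List.range (m-1)).filter (dsEnd sv) ++ [m-1] := by
          have : m + 1 - 1 = (m - 1) + 1 := by omega
          rw [this, List.range_succ, List.filter_append]
          have hde : dsEnd sv (m-1) = true := by
            simp only [dsEnd, show m - 1 + 1 = m by omega, bne_iff_ne, ne_eq]
            exact fun h => heq h.symm
          simp [hde]
        simp only [List.foldl_cons, List.foldl_nil]
        rw [hstepA, hstepB]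
        refine ⟨by simp [hlen], ?_⟩
        rw [hfilter]
        have hmap : ∀ j ∈ (List.range (m-1)).filter (dsEnd sv) ++ [m-1],
            (cs ++ [PySem.List.pyGetD sl (m : Int) 0]).getD j 0 = cs.getD j 0 := by
          intro j hj
          rcases List.mem_append.mp hj with h | h
          · exact getD_append_lt _ _ _ _ (hmask j h)
          · have : j = m - 1 := by simpa using h
            exact getD_append_lt _ _ _ _ (by omega)
        rw [List.map_congr_left hmap]
        have hlast : (cs ++ [PySem.List.pyGetD sl (m : Int) 0]).getD (m+1-1) 0
            = PySem.List.pyGetD sl (m : Int) 0 := by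
          have : m + 1 - 1 = cs.length := by omega
          rw [this, getD_concat_len]
        rw [hlast]
        simp only [List.map_append, List.map_cons, List.map_nil]

-- A's run-end mask is (range (n-1)).map (dsEnd sv)
theorem ds_mask (sv : List Int) (hn : 1 ≤ sv.length) :
    (PySem.List.pyRange 0 ((sv.length : Int) - 1) 1).map
        (fun i => PySem.List.pyGetD sv i 0 != PySem.List.pyGetD sv (i+1) 0)
      = (List.range (sv.length - 1)).map (dsEnd sv) := by
  rw [show ((sv.length : Int) - 1) = ((sv.length - 1 : Nat) : Int) by omega,
      PySem.List.pyRange_zero_nat, List.map_map]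
  apply List.map_congr_left
  intro k _
  simp only [Function.comp, PySem.List.pyGetD_natCast, dsEnd,
    show ((k : Int) + 1) = ((k + 1 : Nat) : Int) by push_cast; ring]

-- A's filtered comprehension over the mask, for any indexed list ys
theorem foldA_out (sv : List Int) (ys : List Int) (d : Int) (hn : 1 ≤ sv.length) :
    (PySem.List.pyRange 0
        ((((PySem.List.pyRange 0 ((sv.length : Int) - 1) 1).map
            (fun i => PySem.List.pyGetD sv i 0 != PySem.List.pyGetD sv (i+1) 0) ++ [true]).length : Int)) 1).foldl
      (fun acc i => if PySem.List.pyGetD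
          ((PySem.List.pyRange 0 ((sv.length : Int) - 1) 1).map
            (fun i => PySem.List.pyGetD sv i 0 != PySem.List.pyGetD sv (i+1) 0) ++ [true]) i false
        then acc ++ [PySem.List.pyGetD ys i d] else acc) []
    = ((List.range (sv.length - 1)).filter (dsEnd sv)).map (fun j => ys.getD j d)
        ++ [ys.getD (sv.length - 1) d] := by
  rw [ds_mask sv hn]
  have hml : ((List.range (sv.length - 1)).map (dsEnd sv)).length = sv.length - 1 := by simp
  have hrl : (((List.range (sv.length - 1)).map (dsEnd sv) ++ [true]).length : Int)
      = ((sv.length : Nat) : Int) := by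
    simp only [List.length_append, hml, List.length_cons, List.length_nil]
    omega
  rw [hrl, PySem.List.foldl_append_if, List.nil_append, PySem.List.pyRange_zero_nat,
      List.filter_map, List.map_map]
  rw [show List.range sv.length = List.range (sv.length - 1) ++ [sv.length - 1] by
        rw [← List.range_succ]; congr 1; omega]
  rw [List.filter_append]
  have hlastb : ((List.range (sv.length - 1)).map (dsEnd sv) ++ [true]).getD (sv.length - 1) false
      = true := by
    have h := getD_concat_len ((List.range (sv.length - 1)).map (dsEnd sv)) true false
    rwa [hml] at h
  have hfr : (List.range (sv.length - 1)).filter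
        (fun k : Nat => ((List.range (sv.length - 1)).map (dsEnd sv) ++ [true]).getD k false)
      = (List.range (sv.length - 1)).filter (dsEnd sv) := by
    apply List.filter_congr
    intro k hk
    have hk' : k < sv.length - 1 := List.mem_range.mp hk
    rw [getD_append_lt _ _ _ _ (by simpa [hml] using hk'),
        PySem.List.getD_map_range _ _ _ _ hk']
  simp only [Function.comp_def, PySem.List.pyGetD_natCast]
  rw [List.map_append, hfr]
  simp only [List.filter_cons, List.filter_nil, hlastb, if_pos, List.map_cons, List.map_nil]

-- ===== VERDICT (by name: the statement is the Claim_ definition above) =====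
theorem downshift_array_spec : Claim_equal_downshift_array := by
  intro sl sv _ hpre
  obtain ⟨hne, hle⟩ := hpre
  have hn : 1 ≤ sv.length := List.length_pos_of_ne_nil hne
  obtain ⟨hlen, hst⟩ := ds_inv sl sv sv.length hn
  simp only [Spec_downshift_array, downshift_array, downshift_array_alt]
  rw [hst, foldA_out sv _ 0 hn, foldA_out sv sv 0 hn]
  have hlastv : PySem.List.pyGetD sv (-1) 0 = sv.getD (sv.length - 1) 0 := by
    rw [PySem.List.pyGetD_neg_one _ _ hne, List.getLast_eq_getElem]
    rw [List.getD_eq_getElem _ _ (by omega)]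
  rw [hlastv]
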